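-- pv_equiv track=rewrite | github.com/Kopkendej/my-first-python-project | asd1.py | harmadikf
-- ===== SOURCE A (Python) =====
-- def harmadikf(q):
--     karakterek = {}
--     for i, karakter in enumerate(q):
--         if karakter in karakterek:
--             return karakter, karakterek[karakter]
--         else:
--             karakterek[karakter] = i
--     return None
-- ===== SOURCE B (Python) =====
-- def harmadikf(q):
--     # Different algorithm: instead of scanning positions left to right, scan the
--     # DISTINCT CHARACTERS; for each, locate its second occurrence (index/find),
--     # and return the character whose second occurrence comes earliest, with its
--     # first index.  Correct because A's answer is exactly the character at the
--     # smallest "second occurrence" position, and those positions are distinct.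
--     best = None
--     for c in set(q):
--         j = q.index(c)
--         k = q.find(c, j + 1)
--         if k != -1 and (best is None or k < best[0]):
--             best = (k, c, j)
--     return None if best is None else (best[1], best[2])
-- ===== Notes on version B (the rewrite author's own statement) =====
-- stated objective: alternative
-- what changed: Replaces A's left-to-right positional scan with a dict of first indices by a per-distinct-character search: for each character in set(q) find its second occurrence with index/find and keep the minimum second-occurrence position.
import Mathlib
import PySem

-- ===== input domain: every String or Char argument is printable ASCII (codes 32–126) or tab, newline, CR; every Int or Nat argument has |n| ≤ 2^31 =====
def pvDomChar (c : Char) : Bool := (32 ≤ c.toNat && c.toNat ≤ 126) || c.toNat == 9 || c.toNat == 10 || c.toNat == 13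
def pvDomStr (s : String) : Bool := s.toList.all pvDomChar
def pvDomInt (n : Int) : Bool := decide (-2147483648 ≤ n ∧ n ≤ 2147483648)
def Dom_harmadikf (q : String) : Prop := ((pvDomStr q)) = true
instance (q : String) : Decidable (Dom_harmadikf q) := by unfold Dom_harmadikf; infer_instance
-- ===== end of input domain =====

-- B replaces A's positional scan with a per-distinct-character second-occurrence search (alternative algorithm, not faster).

-- ===== PORT A =====
-- enumerate loop carrying the dict 'karakterek'; i is the running enumerate index (a Nat, stored as Int)
def harmadikfGoA (d : PySem.Dict Char Int) (i : Nat) : List Char → Option (String × Int)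
  | [] => none
  | c :: rest =>
    match d.get? c with
    | some j => some (String.ofList [c], j)
    | none => harmadikfGoA (d.insert c (i : Int)) (i + 1) rest

def harmadikf (q : String) : Option (String × Int) :=
  harmadikfGoA PySem.Dict.empty 0 q.toList

-- ===== PORT B =====
-- loop body of B: j = q.index(c) (c comes from set(q), so index returns; ported as index?.getD 0),
-- k = q.find(c, j+1) (PySem.Chars.findFrom, exact), then Python's short-circuit
-- 'k != -1 and (best is None or k < best[0])' as nested branches
def harmadikfGoB (l : List Char) : List Char → Option (Int × Char × Int) → Option (Int × Char × Int)
  | [], best => best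
  | c :: rest, best =>
    let j : Int := (((PySem.List.index? l c).getD 0 : Nat) : Int)
    let k : Int := PySem.Chars.findFrom l [c] (j + 1)
    let best' : Option (Int × Char × Int) :=
      if k = -1 then best
      else
        match best with
        | none => some (k, c, j)
        | some b => if k < b.1 then some (k, c, j) else best
    harmadikfGoB l rest best'

-- iteration over set(q): the result does not depend on the iteration order (the minimal
-- second-occurrence position is unique), so folding over PySem.Set.ofList is exact
def harmadikf_alt (q : String) : Option (String × Int) :=
  match harmadikfGoB q.toList (PySem.Set.ofList q.toList) none with
  | none => none
  | some (_, c, j) => some (String.ofList [c], j)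

-- ===== PRECONDITION & SPEC =====
def Spec_harmadikf (q : String) (out : Option (String × Int)) : Prop := out = harmadikf_alt q
instance (q : String) (out : Option (String × Int)) : Decidable (Spec_harmadikf q out) := by unfold Spec_harmadikf; infer_instance

-- ===== CLAIM (what is proved, stated in full; the proofs are below) =====
def Claim_equal_harmadikf : Prop := ∀ (q : String), Dom_harmadikf q → Spec_harmadikf q (harmadikf q)

-- ===== LEMMAS AND PROOFS =====

-- Common reference point: scan indices upward and stop at the first index whose
-- character already occurred; this is A's and B's common answer.
def firstRep (l : List Char) (i : Nat) : Option (String × Int) :=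
  if h : i < l.length then
    let c := l[i]
    let pre := l.take i
    if c ∈ pre then some (String.ofList [c], (((PySem.List.index? pre c).getD 0 : Nat) : Int))
    else firstRep l (i + 1)
  else none
termination_by l.length - i

-- i is a repeat position of l
def isRep (l : List Char) (i : Nat) : Prop := ∃ h : i < l.length, l[i] ∈ l.take i

-- the k computed by B's loop body for character c
def Kof (l : List Char) (c : Char) : Int :=
  PySem.Chars.findFrom l [c] ((((PySem.List.index? l c).getD 0 : Nat) : Int) + 1)

-- accumulator invariant of B's loop
def cand (l : List Char) (b : Option (Int × Char × Int)) : Prop :=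
  b = none ∨ ∃ c ∈ l, Kof l c ≠ -1 ∧
    b = some (Kof l c, c, (((PySem.List.index? l c).getD 0 : Nat) : Int))

-- ---------- A = firstRep ----------

lemma go_eq (n : Nat) : ∀ (l : List Char) (i : Nat) (d : PySem.Dict Char Int),
    l.length - i = n →
    (∀ c, d.get? c = if c ∈ l.take i then some (((PySem.List.index? (l.take i) c).getD 0 : Nat) : Int) else none) →
    harmadikfGoA d i (l.drop i) = firstRep l i := by
  induction n with
  | zero =>
    intro l i d hn _
    have hi : l.length ≤ i := by omega
    rw [List.drop_eq_nil_of_le hi]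
    rw [firstRep, dif_neg (by omega)]
    rfl
  | succ m ih =>
    intro l i d hn hinv
    have hi : i < l.length := by omega
    rw [List.drop_eq_getElem_cons hi]
    rw [firstRep, dif_pos hi]
    simp only []
    by_cases hmem : l[i] ∈ l.take i
    · rw [if_pos hmem]
      rw [harmadikfGoA, hinv, if_pos hmem]
    · rw [if_neg hmem]
      rw [harmadikfGoA, hinv, if_neg hmem]
      apply ih l (i + 1) _ (by omega)
      intro c
      have htake : l.take (i + 1) = l.take i ++ [l[i]] := by
        rw [List.take_add_one, List.getElem?_eq_getElem hi]; rfl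
      rw [PySem.Dict.get?_insert, htake]
      by_cases hc : c = l[i]
      · rw [if_pos hc, if_pos (show c ∈ l.take i ++ [l[i]] by rw [hc]; exact List.mem_append_right _ (List.mem_singleton_self _))]
        subst hc
        rw [PySem.List.index?_append_singleton_self _ _ hmem]
        simp [List.length_take, Nat.min_eq_left (le_of_lt hi)]
      · rw [if_neg hc, hinv c]
        by_cases hcp : c ∈ l.take i
        · rw [if_pos hcp, if_pos (List.mem_append_left _ hcp)]
          rw [PySem.List.index?_append_of_mem _ hcp]
        · rw [if_neg hcp, if_neg (show c ∉ l.take i ++ [l[i]] by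
            simp only [List.mem_append, List.mem_singleton]
            push_neg
            exact ⟨hcp, hc⟩)]

lemma A_eq_firstRep (q : String) : harmadikf q = firstRep q.toList 0 := by
  have := go_eq (q.toList.length) q.toList 0 PySem.Dict.empty (by omega)
    (by intro c; simp [PySem.Dict.get?_empty])
  simpa [harmadikf] using this

-- ---------- small auxiliary facts ----------

lemma singleton_infix_of_mem {c : Char} {t : List Char} (h : c ∈ t) : [c] <:+: t := by
  obtain ⟨s, u, rfl⟩ := List.append_of_mem h
  exact ⟨s, u, by simp⟩

lemma prefix_singleton_drop {c : Char} {l : List Char} {m : Nat}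
    (h : [c] <+: l.drop m) : ∃ hm : m < l.length, l[m] = c := by
  obtain ⟨u, hu⟩ := h
  have hlen : m < l.length := by
    by_contra hge
    rw [List.drop_eq_nil_of_le (by omega)] at hu
    simp at hu
  rw [List.drop_eq_getElem_cons hlen] at hu
  simp only [List.singleton_append, List.cons.injEq] at hu
  exact ⟨hlen, hu.1.symm⟩

lemma drop_prefix_singleton {c : Char} {l : List Char} {m : Nat}
    (hm : m < l.length) (hc : l[m] = c) : [c] <+: l.drop m :=
  ⟨l.drop (m + 1), by rw [List.drop_eq_getElem_cons hm, hc]; rfl⟩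

lemma index_props {l : List Char} {c : Char} (hc : c ∈ l) :
    ∃ h : (PySem.List.index? l c).getD 0 < l.length,
      l[(PySem.List.index? l c).getD 0] = c ∧
      ∀ t, t < (PySem.List.index? l c).getD 0 → ∀ ht : t < l.length, l[t] ≠ c := by
  have hs : (PySem.List.index? l c).isSome := (PySem.List.index?_isSome_iff l c).2 hc
  obtain ⟨k, hk⟩ := Option.isSome_iff_exists.1 hs
  have hg : (PySem.List.index? l c).getD 0 = k := by rw [hk]; rfl
  obtain ⟨hlt, hget, hmin⟩ := PySem.List.getElem_of_index?_eq_some hk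
  rw [hg]
  exact ⟨hlt, hget, fun t ht _ => hmin t ht⟩

lemma Kof_expand (l : List Char) (c : Char) :
    Kof l c = PySem.Chars.findFrom l [c] ((((PySem.List.index? l c).getD 0 + 1 : Nat)) : Int) := by
  unfold Kof; norm_cast

-- ---------- Kof facts ----------

lemma Kof_props {l : List Char} {c : Char} (hc : c ∈ l) (hK : Kof l c ≠ -1) :
    ∃ m : Nat, Kof l c = (m : Int) ∧ (PySem.List.index? l c).getD 0 < m ∧
      ∃ hm : m < l.length, l[m] = c ∧
        ∀ t, (PySem.List.index? l c).getD 0 < t → t < m → ∀ ht : t < l.length, l[t] ≠ c := by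
  obtain ⟨hjl, hget, hmin0⟩ := index_props hc
  set jn := (PySem.List.index? l c).getD 0 with hjn
  have hle : jn + 1 ≤ l.length := hjl
  rw [Kof_expand] at hK ⊢
  obtain ⟨hge, hpre, hminP⟩ := PySem.Chars.findFrom_natCast_spec l [c] (jn + 1) hle hK
  set K := PySem.Chars.findFrom l [c] (((jn + 1 : Nat)) : Int) with hKdef
  have hK0 : 0 ≤ K := le_trans (by positivity) hge
  refine ⟨K.toNat, (Int.toNat_of_nonneg hK0).symm, ?_, ?_⟩
  · have : ((jn + 1 : Nat) : Int) ≤ ((K.toNat : Nat) : Int) := by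
      rw [Int.toNat_of_nonneg hK0]; exact hge
    exact_mod_cast this
  · obtain ⟨hmlt, hgetm⟩ := prefix_singleton_drop hpre
    refine ⟨hmlt, hgetm, ?_⟩
    intro t hjt htm ht heq
    exact hminP t (by omega) htm (drop_prefix_singleton ht heq)

lemma Kof_isRep {l : List Char} {c : Char} (hc : c ∈ l) (hK : Kof l c ≠ -1) :
    isRep l (Kof l c).toNat ∧ ∃ h : (Kof l c).toNat < l.length, l[(Kof l c).toNat] = c := by
  obtain ⟨hjl, hget, _⟩ := index_props hc
  obtain ⟨m, hKm, hjm, hm, hgetm, _⟩ := Kof_props hc hK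
  have htn : (Kof l c).toNat = m := by rw [hKm]; exact Int.toNat_natCast m
  rw [htn]
  refine ⟨⟨hm, ?_⟩, hm, hgetm⟩
  rw [List.mem_take_iff_getElem]
  exact ⟨(PySem.List.index? l c).getD 0, by omega, by rw [hget, hgetm]⟩

lemma Kof_neg_of_norep {l : List Char} (hno : ∀ i, ¬ isRep l i) {c : Char} (hc : c ∈ l) :
    Kof l c = -1 := by
  by_contra hK
  exact hno _ (Kof_isRep hc hK).1

lemma Kof_c0 {l : List Char} {i₀ : Nat} (hlen : i₀ < l.length)
    (hmem : l[i₀] ∈ l.take i₀) (hmin : ∀ k, k < i₀ → ¬ isRep l k) :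
    Kof l (l[i₀]) = (i₀ : Int) := by
  have hc0l : l[i₀] ∈ l := List.getElem_mem hlen
  obtain ⟨hjl, hget, hmin0⟩ := index_props hc0l
  set jn := (PySem.List.index? l (l[i₀])).getD 0 with hjn
  obtain ⟨t, htm, hgt⟩ := List.mem_take_iff_getElem.1 hmem
  have hjt : jn ≤ t := by
    by_contra hlt
    exact hmin0 t (by omega) (by omega) hgt
  have hji : jn < i₀ := by omega
  have hne : Kof l (l[i₀]) ≠ -1 := by
    rw [Kof_expand, ← hjn]
    rw [ne_eq, PySem.Chars.findFrom_natCast_eq_neg_one_iff l _ (jn + 1) (by omega)]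
    push_neg
    apply singleton_infix_of_mem
    rw [List.mem_drop_iff_getElem]
    refine ⟨i₀ - (jn + 1), by omega, ?_⟩
    have harith : (jn + 1) + (i₀ - (jn + 1)) = i₀ := by omega
    simp only [harith]
  obtain ⟨m, hKm, hjm, hm, hgetm, hminm⟩ := Kof_props hc0l hne
  have hmle : m ≤ i₀ := by
    by_contra hgt'
    exact hminm i₀ hji (by omega) hlen rfl
  have hile : i₀ ≤ m := by
    by_contra hlt'
    apply hmin m (by omega)
    refine ⟨hm, ?_⟩
    rw [List.mem_take_iff_getElem]
    exact ⟨jn, by omega, by rw [hget, hgetm]⟩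
  have : m = i₀ := by omega
  rw [hKm, this]

-- ---------- firstRep characterisations ----------

lemma firstRep_none_aux {l : List Char} (hno : ∀ i, ¬ isRep l i) :
    ∀ n s, l.length - s = n → firstRep l s = none := by
  intro n
  induction n with
  | zero =>
    intro s hn
    rw [firstRep, dif_neg (by omega)]
  | succ m ih =>
    intro s hn
    have hs : s < l.length := by omega
    rw [firstRep, dif_pos hs]
    simp only []
    rw [if_neg (fun hm => hno s ⟨hs, hm⟩)]
    exact ih (s + 1) (by omega)

lemma firstRep_some_aux {l : List Char} {i₀ : Nat} (hlen : i₀ < l.length)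
    (hmem : l[i₀] ∈ l.take i₀) (hmin : ∀ k, k < i₀ → ¬ isRep l k) :
    ∀ n s, i₀ - s = n → s ≤ i₀ → firstRep l s =
      some (String.ofList [l[i₀]], (((PySem.List.index? (l.take i₀) (l[i₀])).getD 0 : Nat) : Int)) := by
  intro n
  induction n with
  | zero =>
    intro s hn hs
    have : s = i₀ := by omega
    subst this
    rw [firstRep, dif_pos hlen]
    simp only []
    rw [if_pos hmem]
  | succ m ih =>
    intro s hn hs
    have hsl : s < l.length := by omega
    rw [firstRep, dif_pos hsl]
    simp only []
    rw [if_neg (fun hm => hmin s (by omega) ⟨hsl, hm⟩)]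
    exact ih (s + 1) (by omega) (by omega)

-- ---------- goB characterisations ----------

def stepB (l : List Char) (c : Char) (best : Option (Int × Char × Int)) : Option (Int × Char × Int) :=
  if Kof l c = -1 then best
  else
    match best with
    | none => some (Kof l c, c, (((PySem.List.index? l c).getD 0 : Nat) : Int))
    | some b => if Kof l c < b.1 then some (Kof l c, c, (((PySem.List.index? l c).getD 0 : Nat) : Int)) else best

lemma goB_cons (l : List Char) (c : Char) (rest : List Char) (best : Option (Int × Char × Int)) :
    harmadikfGoB l (c :: rest) best = harmadikfGoB l rest (stepB l c best) := by
  cases best <;> simp only [harmadikfGoB, stepB, Kof]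

lemma stepB_none_of_neg {l : List Char} {c : Char} (hk : Kof l c = -1)
    (best : Option (Int × Char × Int)) : stepB l c best = best := by
  simp only [stepB, hk, if_true]

lemma stepB_some {l : List Char} {c : Char} (hk : ¬ Kof l c = -1) (b : Int × Char × Int) :
    stepB l c (some b) = if Kof l c < b.1 then some (Kof l c, c, (((PySem.List.index? l c).getD 0 : Nat) : Int)) else some b := by
  simp only [stepB, hk, if_false]

lemma stepB_none {l : List Char} {c : Char} (hk : ¬ Kof l c = -1) :
    stepB l c none = some (Kof l c, c, (((PySem.List.index? l c).getD 0 : Nat) : Int)) := by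
  simp only [stepB, hk, if_false]

lemma goB_none {l : List Char} (hno : ∀ i, ¬ isRep l i) :
    ∀ cs, (∀ c ∈ cs, c ∈ l) → harmadikfGoB l cs none = none := by
  intro cs
  induction cs with
  | nil => intro _; rfl
  | cons c rest ih =>
    intro hsub
    rw [goB_cons, stepB_none_of_neg (Kof_neg_of_norep hno (hsub c List.mem_cons_self))]
    exact ih (fun x hx => hsub x (List.mem_cons_of_mem _ hx))

lemma goB_keep {l : List Char} {i₀ : Nat} (hlen : i₀ < l.length)
    (hmin : ∀ k, k < i₀ → ¬ isRep l k) :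
    ∀ cs, (∀ c ∈ cs, c ∈ l) →
      harmadikfGoB l cs (some ((i₀ : Int), l[i₀], (((PySem.List.index? l (l[i₀])).getD 0 : Nat) : Int)))
        = some ((i₀ : Int), l[i₀], (((PySem.List.index? l (l[i₀])).getD 0 : Nat) : Int)) := by
  intro cs
  induction cs with
  | nil => intro _; rfl
  | cons c rest ih =>
    intro hsub
    rw [goB_cons]
    by_cases hk : Kof l c = -1
    · rw [stepB_none_of_neg hk]
      exact ih (fun x hx => hsub x (List.mem_cons_of_mem _ hx))
    · rw [stepB_some hk]
      obtain ⟨m, hKm, _, _, _, _⟩ := Kof_props (hsub c List.mem_cons_self) hk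
      have hrep := (Kof_isRep (hsub c List.mem_cons_self) hk).1
      have him : i₀ ≤ (Kof l c).toNat := by
        by_contra hlt
        exact hmin _ (by omega) hrep
      have hnlt : ¬ Kof l c < (i₀ : Int) := by
        rw [hKm] at him ⊢
        rw [Int.toNat_natCast] at him
        exact_mod_cast not_lt.2 him
      simp only [hnlt, if_false]
      exact ih (fun x hx => hsub x (List.mem_cons_of_mem _ hx))

lemma cand_step {l : List Char} {c : Char} (hcl : c ∈ l) {best : Option (Int × Char × Int)}
    (hb : cand l best) : cand l (stepB l c best) := by
  by_cases hk : Kof l c = -1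
  · rw [stepB_none_of_neg hk]; exact hb
  · rcases hb with rfl | ⟨c', hc'l, hKc', rfl⟩
    · rw [stepB_none hk]
      exact Or.inr ⟨c, hcl, hk, rfl⟩
    · rw [stepB_some hk]
      by_cases hlt : Kof l c < Kof l c'
      · simp only [hlt, if_true]
        exact Or.inr ⟨c, hcl, hk, rfl⟩
      · simp only [hlt, if_false]
        exact Or.inr ⟨c', hc'l, hKc', rfl⟩

lemma goB_hit {l : List Char} {i₀ : Nat} (hlen : i₀ < l.length)
    (hmem : l[i₀] ∈ l.take i₀) (hmin : ∀ k, k < i₀ → ¬ isRep l k) :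
    ∀ cs, (∀ c ∈ cs, c ∈ l) → l[i₀] ∈ cs →
    ∀ best, cand l best →
      harmadikfGoB l cs best
        = some ((i₀ : Int), l[i₀], (((PySem.List.index? l (l[i₀])).getD 0 : Nat) : Int)) := by
  intro cs
  induction cs with
  | nil => intro _ hin; cases hin
  | cons c rest ih =>
    intro hsub hin best hcand
    rw [goB_cons]
    by_cases hcc : c = l[i₀]
    · have hK0 : Kof l c = ((i₀ : Nat) : Int) := by rw [hcc]; exact Kof_c0 hlen hmem hmin
      have hkne : ¬ Kof l c = -1 := by rw [hK0]; omega
      rcases hcand with rfl | ⟨c', hc'l, hKc', rfl⟩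
      · rw [stepB_none hkne, hK0, hcc]
        exact goB_keep hlen hmin rest (fun x hx => hsub x (List.mem_cons_of_mem _ hx))
      · rw [stepB_some hkne, hK0]
        obtain ⟨m', hKm', _, hm', hgetm', _⟩ := Kof_props hc'l hKc'
        have hrep := (Kof_isRep hc'l hKc').1
        have him : i₀ ≤ m' := by
          by_contra hlt
          have : (Kof l c').toNat = m' := by rw [hKm']; exact Int.toNat_natCast m'
          exact hmin _ (by omega) (this ▸ hrep)
        rcases eq_or_lt_of_le him with heq | hlt
        · subst heq
          have hc'eq : c' = l[i₀] := hgetm'.symm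
          rw [hKm']
          have hnlt : ¬ ((i₀ : Nat) : Int) < ((i₀ : Nat) : Int) := lt_irrefl _
          simp only [hnlt, if_false]
          rw [hc'eq]
          exact goB_keep hlen hmin rest (fun x hx => hsub x (List.mem_cons_of_mem _ hx))
        · have hcast : ((i₀ : Nat) : Int) < ((m' : Nat) : Int) := by exact_mod_cast hlt
          rw [hKm']
          simp only [hcast, if_true, hcc]
          exact goB_keep hlen hmin rest (fun x hx => hsub x (List.mem_cons_of_mem _ hx))
    · have hin' : l[i₀] ∈ rest := by
        rcases List.mem_cons.1 hin with h | h
        · exact absurd h.symm hcc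
        · exact h
      exact ih (fun x hx => hsub x (List.mem_cons_of_mem _ hx)) hin' _
        (cand_step (hsub c List.mem_cons_self) hcand)

-- ===== VERDICT (by name: the statement is the Claim_ definition above) =====
theorem harmadikf_spec : Claim_equal_harmadikf := by
  intro q _
  unfold Spec_harmadikf harmadikf_alt
  rw [A_eq_firstRep]
  set l := q.toList with hl
  by_cases hex : ∃ i, isRep l i
  · obtain ⟨i₀, hlen, hmem, hmin⟩ :
        ∃ i₀, ∃ h : i₀ < l.length, l[i₀] ∈ l.take i₀ ∧ ∀ k, k < i₀ → ¬ isRep l k := by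
      haveI : DecidablePred (isRep l) := Classical.decPred _
      obtain ⟨h1, h2⟩ := Nat.find_spec hex
      exact ⟨Nat.find hex, h1, h2, fun k hk => Nat.find_min hex hk⟩
    rw [firstRep_some_aux hlen hmem hmin (i₀ - 0) 0 rfl (Nat.zero_le _)]
    rw [goB_hit hlen hmem hmin (PySem.Set.ofList l)
      (fun c hc => (PySem.Set.mem_ofList l c).1 hc)
      ((PySem.Set.mem_ofList l _).2 (List.getElem_mem hlen))
      none (Or.inl rfl)]
    have hidx : PySem.List.index? (l.take i₀ ++ l.drop i₀) (l[i₀]) = PySem.List.index? (l.take i₀) (l[i₀]) :=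
      PySem.List.index?_append_of_mem _ hmem
    rw [List.take_append_drop] at hidx
    rw [hidx]
  · push_neg at hex
    rw [firstRep_none_aux hex (l.length - 0) 0 rfl]
    rw [goB_none hex (PySem.Set.ofList l) (fun c hc => (PySem.Set.mem_ofList l c).1 hc)]
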